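-- pv_equiv track=rewrite | github.com/KieranMcFarlane/panther_chat | apps/signal-noise-app/scripts/simple_batch_discovery.py | match_entity_to_template
-- ===== SOURCE A (Python) =====
-- def match_entity_to_template(entity_id: str, cluster_id: str, templates: dict) -> dict:
--     """Match entity to template via cluster_id"""
--
--     # Try direct match
--     for template_id, template in templates.items():
--         if template.get("cluster_id") == cluster_id:
--             return template
--
--     # Try fuzzy match
--     for template_id, template in templates.items():
--         template_cluster = template.get("cluster_id", "")
--         if cluster_id in template_cluster or template_cluster in cluster_id:
--             return template
--
--     return None
-- ===== SOURCE B (Python) =====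
-- def match_entity_to_template(entity_id: str, cluster_id: str, templates: dict) -> dict:
--     """Match entity to template via cluster_id (single pass: exact returns eagerly,
--     first fuzzy candidate kept as fallback)."""
--     fuzzy = None
--     for template in templates.values():
--         if template.get("cluster_id") == cluster_id:
--             return template
--         if fuzzy is None:
--             tc = template.get("cluster_id", "")
--             if cluster_id in tc or tc in cluster_id:
--                 fuzzy = template
--     return fuzzy
-- ===== Notes on version B (the rewrite author's own statement) =====
-- stated objective: simpler
-- what changed: Replaces A's two sequential scans (exact pass, then fuzzy pass) with one single pass that returns exact matches eagerly and records the first fuzzy candidate as a fallback.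
import Mathlib
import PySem

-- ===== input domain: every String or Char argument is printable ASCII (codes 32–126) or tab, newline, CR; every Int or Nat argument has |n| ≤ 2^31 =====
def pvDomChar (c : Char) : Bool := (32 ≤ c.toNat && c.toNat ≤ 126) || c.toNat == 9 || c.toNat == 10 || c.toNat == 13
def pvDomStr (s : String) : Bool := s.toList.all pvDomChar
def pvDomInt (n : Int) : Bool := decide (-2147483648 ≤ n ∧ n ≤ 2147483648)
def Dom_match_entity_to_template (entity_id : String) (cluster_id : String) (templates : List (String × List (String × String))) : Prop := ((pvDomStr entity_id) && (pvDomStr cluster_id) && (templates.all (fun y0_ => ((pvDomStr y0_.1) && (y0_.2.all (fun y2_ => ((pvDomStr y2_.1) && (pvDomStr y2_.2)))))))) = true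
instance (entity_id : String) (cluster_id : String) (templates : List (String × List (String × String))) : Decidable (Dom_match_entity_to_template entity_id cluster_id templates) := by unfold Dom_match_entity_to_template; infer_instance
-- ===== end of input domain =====

-- B fuses A's two sequential scans (exact pass, then fuzzy pass) into one pass that
-- returns exact matches eagerly and records the first fuzzy candidate as fallback (objective: simpler).

-- ===== PORT A =====
-- first pass of A: "Try direct match" loop
def pvAExact (cluster_id : String) : List (String × List (String × String)) → Option (List (String × String))
  | [] => none
  | (_, t) :: rest =>
    if PySem.Dict.get? ⟨t⟩ "cluster_id" = some cluster_id then some t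
    else pvAExact cluster_id rest

-- second pass of A: "Try fuzzy match" loop
def pvAFuzzy (cluster_id : String) : List (String × List (String × String)) → Option (List (String × String))
  | [] => none
  | (_, t) :: rest =>
    let template_cluster := PySem.Dict.getD ⟨t⟩ "cluster_id" ""
    if PySem.Str.isIn cluster_id template_cluster || PySem.Str.isIn template_cluster cluster_id then some t
    else pvAFuzzy cluster_id rest

def match_entity_to_template (_entity_id : String) (cluster_id : String) (templates : List (String × List (String × String))) : Option (List (String × String)) :=
  match pvAExact cluster_id templates with
  | some t => some t
  | none =>
    match pvAFuzzy cluster_id templates with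
    | some t => some t
    | none => none

-- ===== PORT B =====
-- B's single loop: 'fuzzy' is the recorded fallback, exact matches return immediately
def pvBLoop (cluster_id : String) (fuzzy : Option (List (String × String))) : List (String × List (String × String)) → Option (List (String × String))
  | [] => fuzzy
  | (_, t) :: rest =>
    if PySem.Dict.get? ⟨t⟩ "cluster_id" = some cluster_id then some t
    else
      match fuzzy with
      | some f => pvBLoop cluster_id (some f) rest
      | none =>
        let tc := PySem.Dict.getD ⟨t⟩ "cluster_id" ""
        if PySem.Str.isIn cluster_id tc || PySem.Str.isIn tc cluster_id then
          pvBLoop cluster_id (some t) rest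
        else pvBLoop cluster_id none rest

def match_entity_to_template_alt (_entity_id : String) (cluster_id : String) (templates : List (String × List (String × String))) : Option (List (String × String)) :=
  pvBLoop cluster_id none templates

-- ===== PRECONDITION & SPEC =====
def Spec_match_entity_to_template (entity_id : String) (cluster_id : String) (templates : List (String × List (String × String))) (out : Option (List (String × String))) : Prop := out = match_entity_to_template_alt entity_id cluster_id templates
instance (entity_id : String) (cluster_id : String) (templates : List (String × List (String × String))) (out : Option (List (String × String))) : Decidable (Spec_match_entity_to_template entity_id cluster_id templates out) := by unfold Spec_match_entity_to_template; infer_instance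

-- ===== CLAIM (what is proved, stated in full; the proofs are below) =====
def Claim_equal_match_entity_to_template : Prop := ∀ (entity_id : String) (cluster_id : String) (templates : List (String × List (String × String))), Dom_match_entity_to_template entity_id cluster_id templates → Spec_match_entity_to_template entity_id cluster_id templates (match_entity_to_template entity_id cluster_id templates)

-- ===== LEMMAS AND PROOFS =====
-- invariant of B's loop: an exact match in the remaining list wins; otherwise the
-- recorded fallback wins; otherwise the first fuzzy match of the remaining list
theorem pvBLoop_eq (cluster_id : String) (ts : List (String × List (String × String))) :
    ∀ fuzzy, pvBLoop cluster_id fuzzy ts =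
      match pvAExact cluster_id ts with
      | some t => some t
      | none =>
        match fuzzy with
        | some f => some f
        | none => pvAFuzzy cluster_id ts := by
  induction ts with
  | nil => intro fuzzy; cases fuzzy <;> simp [pvBLoop, pvAExact, pvAFuzzy]
  | cons hd rest ih =>
    intro fuzzy
    obtain ⟨id, t⟩ := hd
    simp only [pvBLoop, pvAExact, pvAFuzzy, ih]
    by_cases hx : PySem.Dict.get? ⟨t⟩ "cluster_id" = some cluster_id
    · simp [hx]
    · cases fuzzy <;> cases hA : pvAExact cluster_id rest <;>
        simp only [hx, if_false, hA] <;> split <;> rfl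

-- ===== VERDICT (by name: the statement is the Claim_ definition above) =====
theorem match_entity_to_template_spec : Claim_equal_match_entity_to_template := by
  intro entity_id cluster_id templates _
  unfold Spec_match_entity_to_template match_entity_to_template match_entity_to_template_alt
  rw [pvBLoop_eq]
  cases pvAExact cluster_id templates <;> cases pvAFuzzy cluster_id templates <;> simp
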